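-- pv_equiv track=rewrite | github.com/joshuago78/aoc | 2016/day14.py | has_fivepeat
-- ===== SOURCE A (Python) =====
-- def has_fivepeat(key, char):
--     ptr = 0
--     while ptr < len(key) - 4:
--         if key[ptr] == char:
--             for offset in range(1,5):
--                 if key[ptr] != key[ptr+offset]:
--                     break
--             else:
--                 return True
--             ptr += offset
--         else:
--             ptr += 1
--     return False
-- ===== SOURCE B (Python) =====
-- def has_fivepeat(key, char):
--     run = 0
--     for c in key:
--         if c == char:
--             run += 1
--             if run == 5:
--                 return True
--         else:
--             run = 0
--     return False
-- ===== Notes on version B (the rewrite author's own statement) =====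
-- stated objective: simpler
-- what changed: Replaces the while-loop with an explicit pointer and a nested offset scan (with skip-ahead and per-step indexing) by a single flat for-loop over the characters that maintains a run-length counter of consecutive matches.
import Mathlib
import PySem

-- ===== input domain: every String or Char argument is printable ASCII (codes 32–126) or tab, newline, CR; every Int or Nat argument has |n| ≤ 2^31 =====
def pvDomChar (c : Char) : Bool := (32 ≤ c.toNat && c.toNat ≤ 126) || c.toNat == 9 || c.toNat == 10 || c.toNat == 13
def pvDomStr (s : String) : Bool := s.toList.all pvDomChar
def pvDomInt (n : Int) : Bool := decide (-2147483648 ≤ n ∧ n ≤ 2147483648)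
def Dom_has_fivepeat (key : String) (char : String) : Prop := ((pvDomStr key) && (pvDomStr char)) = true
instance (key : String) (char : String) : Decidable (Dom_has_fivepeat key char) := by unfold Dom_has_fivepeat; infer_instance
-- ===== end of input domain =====

-- B replaces A's pointer-with-skip nested-offset scan by one flat pass keeping a run-length counter; objective: simpler.


-- ===== PORT A =====
-- Python's inner `for offset in range(1,5): if key[ptr] != key[ptr+offset]: break` / `else:`:
-- returns the offset the loop breaks at (`some off`), or `none` when the loop completes.
-- Indexing is exact here: under the while-condition ptr+4 < len every accessed index is in range,
-- so `List.getD _ _ ' '` equals Python's key[_].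
def pvBreakOffset (l : List Char) (a : Char) (ptr : Nat) : List Nat → Option Nat
  | [] => none
  | off :: rest => if l.getD (ptr + off) ' ' ≠ a then some off else pvBreakOffset l a ptr rest

-- needed by pvGoA's decreasing_by
theorem pvBreakOffset_mem (l : List Char) (a : Char) (ptr : Nat) :
    ∀ (os : List Nat) (off : Nat), pvBreakOffset l a ptr os = some off → off ∈ os := by
  intro os
  induction os with
  | nil => intro off h; simp [pvBreakOffset] at h
  | cons o rest ih =>
    intro off h
    simp only [pvBreakOffset] at h
    split at h
    · simp at h; simp [h]
    · exact List.mem_cons_of_mem _ (ih off h)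

-- the while loop of A; Python's `key[ptr] == char` compares the 1-char string key[ptr] with char,
-- modelled as `char.toList = [a]`.
def pvGoA (l : List Char) (char : String) (ptr : Nat) : Bool :=
  if h : ptr + 4 < l.length then
    if char.toList = [l.getD ptr ' '] then
      match hbo : pvBreakOffset l (l.getD ptr ' ') ptr [1, 2, 3, 4] with
      | none => true
      | some off => pvGoA l char (ptr + off)
    else
      pvGoA l char (ptr + 1)
  else
    false
  termination_by l.length - ptr
  decreasing_by
  · have hm := pvBreakOffset_mem l (l.getD ptr ' ') ptr [1, 2, 3, 4] off hbo
    simp at hm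
    omega
  · omega

def has_fivepeat (key : String) (char : String) : Bool :=
  pvGoA key.toList char 0

-- ===== PORT B =====
-- the for-loop of B with its run counter
def pvGoB (char : String) : List Char → Nat → Bool
  | [], _ => false
  | c :: rest, run =>
    if char.toList = [c] then
      if run + 1 = 5 then true else pvGoB char rest (run + 1)
    else
      pvGoB char rest 0

def has_fivepeat_alt (key : String) (char : String) : Bool :=
  pvGoB char key.toList 0

-- ===== PRECONDITION & SPEC =====
def Spec_has_fivepeat (key : String) (char : String) (out : Bool) : Prop := out = has_fivepeat_alt key char
instance (key : String) (char : String) (out : Bool) : Decidable (Spec_has_fivepeat key char out) := by unfold Spec_has_fivepeat; infer_instance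

-- ===== CLAIM (what is proved, stated in full; the proofs are below) =====
def Claim_equal_has_fivepeat : Prop := ∀ (key : String) (char : String), Dom_has_fivepeat key char → Spec_has_fivepeat key char (has_fivepeat key char)

-- ===== LEMMAS AND PROOFS =====

-- "position j of l matches char" (as Python's 1-char-string comparison)
def pvM (l : List Char) (char : String) (j : Nat) : Prop := char.toList = [l.getD j ' ']

theorem pvM_cons_zero (c : Char) (l : List Char) (char : String) :
    pvM (c :: l) char 0 ↔ char.toList = [c] := by simp [pvM]

theorem pvM_cons_succ (c : Char) (l : List Char) (char : String) (j : Nat) :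
    pvM (c :: l) char (j + 1) ↔ pvM l char j := by simp [pvM]

theorem pvBreakOffset_none (l : List Char) (a : Char) (ptr : Nat) :
    ∀ (os : List Nat), pvBreakOffset l a ptr os = none →
      ∀ off ∈ os, l.getD (ptr + off) ' ' = a := by
  intro os
  induction os with
  | nil => simp
  | cons o rest ih =>
    intro h off hoff
    simp only [pvBreakOffset] at h
    split at h
    · simp at h
    · rcases List.mem_cons.mp hoff with rfl | hmem
      · by_contra hne; simp_all
      · exact ih h off hmem

theorem pvBreakOffset_some_ne (l : List Char) (a : Char) (ptr : Nat) :
    ∀ (os : List Nat) (off : Nat), pvBreakOffset l a ptr os = some off →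
      l.getD (ptr + off) ' ' ≠ a := by
  intro os
  induction os with
  | nil => intro off h; simp [pvBreakOffset] at h
  | cons o rest ih =>
    intro off h
    simp only [pvBreakOffset] at h
    split at h
    · simp at h; subst h; assumption
    · exact ih off h

-- A returns true from ptr iff some window of 5 consecutive matches starts at or after ptr
theorem pvGoA_iff (l : List Char) (char : String) (ptr : Nat) :
    pvGoA l char ptr = true ↔
      ∃ i, ptr ≤ i ∧ i + 5 ≤ l.length ∧ ∀ j < 5, pvM l char (i + j) := by
  fun_induction pvGoA l char ptr with
  | case1 ptr h hc hbo =>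
    -- inner loop completed: a window starts at ptr
    simp only [true_iff]
    refine ⟨ptr, le_refl _, by omega, ?_⟩
    intro j hj
    match j with
    | 0 => simpa [pvM] using hc
    | (k+1) =>
      have heq := pvBreakOffset_none l (l.getD ptr ' ') ptr [1, 2, 3, 4] hbo (k + 1) (by simp; omega)
      unfold pvM
      rw [heq]
      exact hc
  | case2 ptr h hc off hbo ih =>
    rw [ih]
    have hmem := pvBreakOffset_mem l (l.getD ptr ' ') ptr [1, 2, 3, 4] off hbo
    have hne := pvBreakOffset_some_ne l (l.getD ptr ' ') ptr [1, 2, 3, 4] off hbo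
    simp only [List.mem_cons] at hmem
    have hoff : 1 ≤ off ∧ off ≤ 4 := by
      rcases hmem with rfl | rfl | rfl | rfl | hmem0
      · omega
      · omega
      · omega
      · omega
      · simp at hmem0
    constructor
    · rintro ⟨i, hi, hlen, hj⟩; exact ⟨i, by omega, hlen, hj⟩
    · rintro ⟨i, hi, hlen, hj⟩
      refine ⟨i, ?_, hlen, hj⟩
      by_contra hlt
      have hj' := hj (ptr + off - i) (by omega)
      have : ptr + off = i + (ptr + off - i) := by omega
      rw [← this] at hj'
      unfold pvM at hj'
      rw [hc] at hj'
      exact hne (by injection hj'.symm)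
  | case3 ptr h hc ih =>
    rw [ih]
    constructor
    · rintro ⟨i, hi, hlen, hj⟩; exact ⟨i, by omega, hlen, hj⟩
    · rintro ⟨i, hi, hlen, hj⟩
      refine ⟨i, ?_, hlen, hj⟩
      rcases Nat.eq_or_lt_of_le hi with heq | hlt
      · exfalso
        subst heq
        have := hj 0 (by omega)
        simp only [Nat.add_zero] at this
        exact hc this
      · omega
  | case4 ptr h =>
    simp only [Bool.false_eq_true, false_iff]
    rintro ⟨i, hi, hlen, -⟩
    omega

-- B's loop invariant: from run counter r (r ≤ 4), it returns true iff the first 5-r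
-- characters all match (completing the current run) or a full window starts strictly inside
theorem pvGoB_iff (char : String) :
    ∀ (l : List Char) (r : Nat), r ≤ 4 →
      (pvGoB char l r = true ↔
        ((5 - r ≤ l.length ∧ ∀ j < 5 - r, pvM l char j) ∨
         (∃ i, 1 ≤ i ∧ i + 5 ≤ l.length ∧ ∀ j < 5, pvM l char (i + j)))) := by
  intro l
  induction l with
  | nil =>
    intro r hr
    simp only [pvGoB, Bool.false_eq_true, false_iff]
    rintro (⟨h1, -⟩ | ⟨i, -, h2, -⟩)
    · simp only [List.length_nil] at h1; omega
    · simp only [List.length_nil] at h2; omega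
  | cons c rest ih =>
    intro r hr
    simp only [pvGoB]
    by_cases hc : char.toList = [c]
    · simp only [if_pos hc]
      by_cases hr5 : r + 1 = 5
      · simp only [if_pos hr5, true_iff]
        left
        refine ⟨by simp; omega, ?_⟩
        intro j hj
        have : j = 0 := by omega
        subst this
        simpa [pvM_cons_zero]
      · simp only [if_neg hr5]
        rw [ih (r + 1) (by omega)]
        constructor
        · rintro (⟨hlen, hj⟩ | ⟨i, hi, hlen, hj⟩)
          · left
            refine ⟨by simp; omega, ?_⟩
            intro j hjlt
            match j with
            | 0 => simpa [pvM_cons_zero]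
            | (k+1) => exact (pvM_cons_succ _ _ _ _).mpr (hj k (by omega))
          · right
            refine ⟨i + 1, by omega, by simp; omega, ?_⟩
            intro j hjlt
            have : i + 1 + j = (i + j) + 1 := by omega
            rw [this, pvM_cons_succ]
            exact hj j hjlt
        · rintro (⟨hlen, hj⟩ | ⟨i, hi, hlen, hj⟩)
          · left
            refine ⟨by simp at hlen ⊢; omega, ?_⟩
            intro j hjlt
            have := hj (j + 1) (by omega)
            exact (pvM_cons_succ _ _ _ _).mp this
          · rcases Nat.lt_or_ge 1 i with hi2 | hi1
            · right
              refine ⟨i - 1, by omega, by simp at hlen ⊢; omega, ?_⟩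
              intro j hjlt
              have h0 := hj j hjlt
              have heq : i + j = (i - 1 + j) + 1 := by omega
              rw [heq, pvM_cons_succ] at h0
              exact h0
            · -- i = 1: the window is exactly the first 5 of rest
              have : i = 1 := by omega
              subst this
              left
              refine ⟨by simp at hlen ⊢; omega, ?_⟩
              intro j hjlt
              have := hj j (by omega)
              have h1 : 1 + j = j + 1 := by omega
              rw [h1, pvM_cons_succ] at this
              exact this
    · simp only [if_neg hc]
      rw [ih 0 (by omega)]
      constructor
      · rintro (⟨hlen, hj⟩ | ⟨i, hi, hlen, hj⟩)
        · right
          refine ⟨1, le_refl _, by simp at hlen ⊢; omega, ?_⟩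
          intro j hjlt
          have h1 : 1 + j = j + 1 := by omega
          rw [h1, pvM_cons_succ]
          exact hj j (by omega)
        · right
          refine ⟨i + 1, by omega, by simp at hlen ⊢; omega, ?_⟩
          intro j hjlt
          have : i + 1 + j = (i + j) + 1 := by omega
          rw [this, pvM_cons_succ]
          exact hj j hjlt
      · rintro (⟨hlen, hj⟩ | ⟨i, hi, hlen, hj⟩)
        · exfalso
          have := hj 0 (by omega)
          rw [pvM_cons_zero] at this
          exact hc this
        · rcases Nat.lt_or_ge 1 i with hi2 | hi1
          · right
            refine ⟨i - 1, by omega, by simp at hlen ⊢; omega, ?_⟩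
            intro j hjlt
            have h0 := hj j hjlt
            have heq : i + j = (i - 1 + j) + 1 := by omega
            rw [heq, pvM_cons_succ] at h0
            exact h0
          · have : i = 1 := by omega
            subst this
            left
            refine ⟨by simp at hlen ⊢; omega, ?_⟩
            intro j hjlt
            have := hj j (by omega)
            have h1 : 1 + j = j + 1 := by omega
            rw [h1, pvM_cons_succ] at this
            exact this

-- ===== VERDICT (by name: the statement is the Claim_ definition above) =====
theorem has_fivepeat_spec : Claim_equal_has_fivepeat := by
  intro key char _
  unfold Spec_has_fivepeat has_fivepeat has_fivepeat_alt
  have hA := pvGoA_iff key.toList char 0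
  have hB := pvGoB_iff char key.toList 0 (by omega)
  have hiff : pvGoA key.toList char 0 = true ↔ pvGoB char key.toList 0 = true := by
    rw [hA, hB]
    constructor
    · rintro ⟨i, -, hlen, hj⟩
      rcases Nat.eq_zero_or_pos i with rfl | hi
      · left; exact ⟨by simpa using hlen, fun j hj' => by simpa using hj j (by omega)⟩
      · right; exact ⟨i, hi, hlen, hj⟩
    · rintro (⟨hlen, hj⟩ | ⟨i, -, hlen, hj⟩)
      · exact ⟨0, by omega, by simpa using hlen, fun j hj' => by simpa using hj j (by omega)⟩
      · exact ⟨i, by omega, hlen, hj⟩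
  exact Bool.eq_iff_iff.mpr hiff
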